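-- pv_equiv track=rewrite | github.com/almbayedahmad/medflux | medflux/medflux_backend/Preprocessing/output_structure/readers_outputs/text_blocks.py | _normalise_lang
-- ===== SOURCE A (Python) =====
-- from typing import Any, Dict, List, Optional
--
-- _LANG_ALIAS = {
--     "deu": "de",
--     "ger": "de",
--     "german": "de",
--     "de": "de",
--     "eng": "en",
--     "english": "en",
--     "en": "en",
--     "mixed": "mixed",
-- }
--
-- _ALLOWED_LANGS = ("de", "en")
--
-- _DEFAULT_LANG = "de"
--
-- def _tokenise_lang(raw: Any) -> List[str]:
--     if raw is None:
--         return []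
--     text = str(raw)
--     if not text:
--         return []
--     return [token.strip() for token in text.replace(",", "+").split("+") if token]
--
-- def _normalise_lang(raw: Any, fallback: Any = None) -> str:
--     tokens: List[str] = []
--     tokens.extend(_tokenise_lang(raw))
--     if not tokens:
--         tokens.extend(_tokenise_lang(fallback))
--     normalised: List[str] = []
--     for token in tokens:
--         mapped = _LANG_ALIAS.get(token.lower(), token.lower())
--         if mapped in _ALLOWED_LANGS:
--             if mapped not in normalised:
--                 normalised.append(mapped)
--         elif mapped == "mixed":
--             for alias in _ALLOWED_LANGS:
--                 if alias not in normalised: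
--                     normalised.append(alias)
--     if not normalised:
--         return _DEFAULT_LANG
--     if len(normalised) == 2:
--         return "de+en"
--     return normalised[0]
-- ===== SOURCE B (Python) =====
-- from typing import Any, List
--
-- # All spellings (lowercased) that indicate German resp. English; "mixed" indicates both.
-- _DE_WORDS = frozenset({"deu", "ger", "german", "de", "mixed"})
-- _EN_WORDS = frozenset({"eng", "english", "en", "mixed"})
--
--
-- def _tokenise_lang(raw: Any) -> List[str]:
--     if raw is None:
--         return []
--     text = str(raw)
--     if not text:
--         return []
--     return [token.strip() for token in text.replace(",", "+").split("+") if token]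
--
--
-- def _normalise_lang(raw: Any, fallback: Any = None) -> str:
--     tokens = _tokenise_lang(raw) or _tokenise_lang(fallback)
--     lowered = [t.lower() for t in tokens]
--     de = any(t in _DE_WORDS for t in lowered)
--     en = any(t in _EN_WORDS for t in lowered)
--     return "de+en" if de and en else ("en" if en else "de")
-- ===== Notes on version B (the rewrite author's own statement) =====
-- stated objective: simpler
-- what changed: Drops the alias dict, the stateful dedup-list loop, the mixed-expansion inner loop and the length-based final branch: two independent declarative membership queries (any token in a German word set / an English word set, 'mixed' listed in both) decide the closed-form result.
import Mathlib
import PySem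

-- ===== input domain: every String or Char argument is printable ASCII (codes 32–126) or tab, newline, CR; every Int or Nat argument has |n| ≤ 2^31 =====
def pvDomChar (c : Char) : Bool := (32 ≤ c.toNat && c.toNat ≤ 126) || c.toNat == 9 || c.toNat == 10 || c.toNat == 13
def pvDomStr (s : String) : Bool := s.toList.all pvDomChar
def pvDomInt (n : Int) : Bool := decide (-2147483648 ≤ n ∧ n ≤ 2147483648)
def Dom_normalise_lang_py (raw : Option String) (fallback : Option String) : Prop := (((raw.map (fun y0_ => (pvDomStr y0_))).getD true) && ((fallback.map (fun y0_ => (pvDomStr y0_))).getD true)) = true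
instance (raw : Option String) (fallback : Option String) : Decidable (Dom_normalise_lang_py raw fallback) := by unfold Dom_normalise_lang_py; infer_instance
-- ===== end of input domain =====

-- B drops A's alias dict, its stateful dedup-list loop with the mixed-expansion inner loop
-- and the length-based final branch: two independent membership queries over static word
-- sets decide the closed-form result; objective: simpler.

-- ===== PORT A =====
-- module constant _LANG_ALIAS (used by A only)
def pvLangAlias : PySem.Dict String String :=
  PySem.Dict.ofList [("deu","de"),("ger","de"),("german","de"),("de","de"),
                     ("eng","en"),("english","en"),("en","en"),("mixed","mixed")]

-- shared helper _tokenise_lang (identical in Source A and Source B)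
def pvTokenise (raw : Option String) : List String :=
  match raw with
  | none => []
  | some text =>
    if text = "" then []
    else (((PySem.Str.replace text "," "+").splitOn "+").filter (fun t => t ≠ "")).map
      PySem.Str.strip

-- body of A's `for token in tokens` loop over the dedup list `normalised`
def pvStepA (norm : List String) (token : String) : List String :=
  let mapped := PySem.Dict.getD pvLangAlias (PySem.Str.lower token) (PySem.Str.lower token)
  if mapped = "de" ∨ mapped = "en" then        -- mapped in _ALLOWED_LANGS (a 2-tuple)
    if mapped ∈ norm then norm else norm ++ [mapped]
  else if mapped = "mixed" then
    ["de", "en"].foldl (fun n al => if al ∈ n then n else n ++ [al]) norm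
  else norm

def normalise_lang_py (raw : Option String) (fallback : Option String) : String :=
  let tokens := pvTokenise raw
  let tokens := if tokens = [] then tokens ++ pvTokenise fallback else tokens
  let normalised := tokens.foldl pvStepA []
  if normalised = [] then "de"
  else if normalised.length = 2 then "de+en"
  else normalised.headD ""                      -- normalised[0]; list is nonempty here

-- ===== PORT B =====
-- module constants _DE_WORDS / _EN_WORDS (frozensets of spellings; "mixed" in both)
def pvDeWords : PySem.Set String := PySem.Set.ofList ["deu", "ger", "german", "de", "mixed"]
def pvEnWords : PySem.Set String := PySem.Set.ofList ["eng", "english", "en", "mixed"]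

def normalise_lang_py_alt (raw : Option String) (fallback : Option String) : String :=
  let t0 := pvTokenise raw
  let tokens := if t0 = [] then pvTokenise fallback else t0     -- `a or b` on lists
  let lowered := tokens.map PySem.Str.lower
  let de := lowered.any (fun t => PySem.Set.contains pvDeWords t)
  let en := lowered.any (fun t => PySem.Set.contains pvEnWords t)
  if de && en then "de+en" else if en then "en" else "de"

-- ===== PRECONDITION & SPEC =====
def Spec_normalise_lang_py (raw : Option String) (fallback : Option String) (out : String) : Prop := out = normalise_lang_py_alt raw fallback
instance (raw : Option String) (fallback : Option String) (out : String) : Decidable (Spec_normalise_lang_py raw fallback out) := by unfold Spec_normalise_lang_py; infer_instance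

-- ===== CLAIM (what is proved, stated in full; the proofs are below) =====
def Claim_equal_normalise_lang_py : Prop := ∀ (raw : Option String) (fallback : Option String), Dom_normalise_lang_py raw fallback → Spec_normalise_lang_py raw fallback (normalise_lang_py raw fallback)

-- ===== LEMMAS AND PROOFS =====

-- B's two per-token membership tests, as Bools
def pvDeP (t : String) : Bool := PySem.Set.contains pvDeWords (PySem.Str.lower t)
def pvEnP (t : String) : Bool := PySem.Set.contains pvEnWords (PySem.Str.lower t)

-- invariant relating A's dedup list to the pair of presence flags accumulated so far
def pvInv (norm : List String) (d e : Bool) : Prop :=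
  (norm = [] ∧ d = false ∧ e = false) ∨
  (norm = ["de"] ∧ d = true ∧ e = false) ∨
  (norm = ["en"] ∧ d = false ∧ e = true) ∨
  ((norm = ["de", "en"] ∨ norm = ["en", "de"]) ∧ d = true ∧ e = true)

-- what A's alias lookup and B's two membership tests say about one token, jointly
theorem pvMappedCases (t : String) :
    (PySem.Dict.getD pvLangAlias (PySem.Str.lower t) (PySem.Str.lower t) = "de" ∧
       pvDeP t = true ∧ pvEnP t = false) ∨
    (PySem.Dict.getD pvLangAlias (PySem.Str.lower t) (PySem.Str.lower t) = "en" ∧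
       pvDeP t = false ∧ pvEnP t = true) ∨
    (PySem.Dict.getD pvLangAlias (PySem.Str.lower t) (PySem.Str.lower t) = "mixed" ∧
       pvDeP t = true ∧ pvEnP t = true) ∨
    (PySem.Dict.getD pvLangAlias (PySem.Str.lower t) (PySem.Str.lower t) ≠ "de" ∧
       PySem.Dict.getD pvLangAlias (PySem.Str.lower t) (PySem.Str.lower t) ≠ "en" ∧
       PySem.Dict.getD pvLangAlias (PySem.Str.lower t) (PySem.Str.lower t) ≠ "mixed" ∧
       pvDeP t = false ∧ pvEnP t = false) := by
  unfold pvDeP pvEnP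
  generalize PySem.Str.lower t = l
  by_cases h1 : l = "deu"; · subst h1; decide
  by_cases h2 : l = "ger"; · subst h2; decide
  by_cases h3 : l = "german"; · subst h3; decide
  by_cases h4 : l = "de"; · subst h4; decide
  by_cases h5 : l = "eng"; · subst h5; decide
  by_cases h6 : l = "english"; · subst h6; decide
  by_cases h7 : l = "en"; · subst h7; decide
  by_cases h8 : l = "mixed"; · subst h8; decide
  have e1 : ("deu" == l) = false := by simp [Ne.symm h1]
  have e2 : ("ger" == l) = false := by simp [Ne.symm h2]
  have e3 : ("german" == l) = false := by simp [Ne.symm h3]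
  have e4 : ("de" == l) = false := by simp [Ne.symm h4]
  have e5 : ("eng" == l) = false := by simp [Ne.symm h5]
  have e6 : ("english" == l) = false := by simp [Ne.symm h6]
  have e7 : ("en" == l) = false := by simp [Ne.symm h7]
  have e8 : ("mixed" == l) = false := by simp [Ne.symm h8]
  have hm : PySem.Dict.getD pvLangAlias l l = l := by
    simp [pvLangAlias, PySem.Dict.getD, PySem.Dict.get?, PySem.Dict.ofList,
          PySem.Dict.update, PySem.Dict.insert, PySem.Dict.empty, PySem.Dict.contains,
          List.find?, e1, e2, e3, e4, e5, e6, e7, e8]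
  refine Or.inr (Or.inr (Or.inr ⟨by rw [hm]; exact h4, by rw [hm]; exact h7,
    by rw [hm]; exact h8, ?_, ?_⟩)) <;>
    simp [pvDeWords, pvEnWords, PySem.Set.ofList, PySem.Set.contains, PySem.Set.add,
          h1, h2, h3, h4, h5, h6, h7, h8]

-- one step of A's loop preserves the invariant against OR-ing in B's per-token tests
theorem pvInv_step (norm : List String) (d e : Bool) (t : String)
    (h : pvInv norm d e) : pvInv (pvStepA norm t) (d || pvDeP t) (e || pvEnP t) := by
  rcases pvMappedCases t with ⟨hm, hd, he⟩ | ⟨hm, hd, he⟩ | ⟨hm, hd, he⟩ | ⟨hm1, hm2, hm3, hd, he⟩ <;>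
  rcases h with ⟨g1, g2, g3⟩ | ⟨g1, g2, g3⟩ | ⟨g1, g2, g3⟩ | ⟨g1, g2, g3⟩ <;>
    (try rcases g1 with g1 | g1) <;> (try subst g1) <;> subst g2 <;> subst g3 <;>
    simp_all [pvInv, pvStepA]

-- the invariant carried over any token list
theorem pvInv_foldl (ts : List String) (norm : List String) (d e : Bool)
    (h : pvInv norm d e) :
    pvInv (ts.foldl pvStepA norm)
      (d || (ts.map PySem.Str.lower).any (fun t => PySem.Set.contains pvDeWords t))
      (e || (ts.map PySem.Str.lower).any (fun t => PySem.Set.contains pvEnWords t)) := by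
  induction ts generalizing norm d e with
  | nil => simpa using h
  | cons t ts ih =>
    have h' := pvInv_step norm d e t h
    have := ih (pvStepA norm t) (d || pvDeP t) (e || pvEnP t) h'
    simpa [pvDeP, pvEnP, Bool.or_assoc] using this

-- A's final branch equals B's closed form, for any token list
theorem pvOut (ts : List String) :
    (if ts.foldl pvStepA [] = [] then "de"
     else if (ts.foldl pvStepA []).length = 2 then "de+en"
     else (ts.foldl pvStepA []).headD "") =
    (if ((ts.map PySem.Str.lower).any (fun t => PySem.Set.contains pvDeWords t) &&
         (ts.map PySem.Str.lower).any (fun t => PySem.Set.contains pvEnWords t)) then "de+en"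
     else if (ts.map PySem.Str.lower).any (fun t => PySem.Set.contains pvEnWords t) then "en"
     else "de") := by
  have h := pvInv_foldl ts [] false false (Or.inl ⟨rfl, rfl, rfl⟩)
  simp only [Bool.false_or] at h
  rcases h with ⟨h1, h2, h3⟩ | ⟨h1, h2, h3⟩ | ⟨h1, h2, h3⟩ | ⟨h1, h2, h3⟩ <;>
    [skip; skip; skip; rcases h1 with h1 | h1] <;> rw [h1, h2, h3] <;> rfl

-- ===== VERDICT (by name: the statement is the Claim_ definition above) =====
theorem normalise_lang_py_spec : Claim_equal_normalise_lang_py := by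
  intro raw fallback _
  unfold Spec_normalise_lang_py
  simp only [normalise_lang_py, normalise_lang_py_alt]
  by_cases hr : pvTokenise raw = [] <;>
    simp only [hr, if_true, if_false, List.nil_append] <;> exact pvOut _
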